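-- pv_equiv track=rewrite | github.com/theFellandes/AlgorithmProject | graph_util.py | graph_generator_kruskal
-- ===== SOURCE A (Python) =====
-- def graph_generator_kruskal(number_of_cities: int):
--     vertices = [*range(1, number_of_cities + 1)]
--     weights = []
--     for i in vertices:
--         for j in vertices:
--             if abs(i - j) <= 3 and i != j:
--                 weights.append([i + j, i, j])
--
--     return vertices, weights
-- ===== SOURCE B (Python) =====
-- def graph_generator_kruskal(number_of_cities: int):
--     n = number_of_cities
--     vertices = list(range(1, n + 1))
--     weights = [[2 * i + d, i, i + d]
--                for i in vertices
--                for d in (-3, -2, -1, 1, 2, 3)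
--                if 1 <= i + d <= n]
--     return vertices, weights
-- ===== Notes on version B (the rewrite author's own statement) =====
-- stated objective: faster
-- what changed: Instead of scanning all n vertices for each i with a distance test and an accumulator loop, B builds the edge list as a flat comprehension over the six fixed offsets -3..3 per vertex, keeping only neighbours inside 1..n.
import Mathlib
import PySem

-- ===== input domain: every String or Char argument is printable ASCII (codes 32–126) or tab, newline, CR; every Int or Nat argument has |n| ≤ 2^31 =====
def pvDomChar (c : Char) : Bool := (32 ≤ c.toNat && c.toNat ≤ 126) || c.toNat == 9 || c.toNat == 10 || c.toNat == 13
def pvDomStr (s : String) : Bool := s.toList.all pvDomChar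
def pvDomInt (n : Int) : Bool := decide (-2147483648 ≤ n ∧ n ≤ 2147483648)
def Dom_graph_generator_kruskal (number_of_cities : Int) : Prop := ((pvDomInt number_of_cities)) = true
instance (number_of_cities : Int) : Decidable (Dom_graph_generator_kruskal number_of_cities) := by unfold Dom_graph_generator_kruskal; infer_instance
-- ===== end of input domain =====

-- B drops A's inner scan of all n vertices: it emits edges as a flat comprehension over the six fixed offsets -3..3 per vertex, clipped to 1..n (O(n) instead of O(n^2)).

-- ===== PORT A =====
def graph_generator_kruskal (number_of_cities : Int) : List Int × List (List Int) :=
  let vertices := PySem.List.pyRange 1 (number_of_cities + 1) 1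
  let weights :=
    vertices.foldl (fun w i =>
      vertices.foldl (fun w j =>
        if (i - j).natAbs ≤ 3 ∧ i ≠ j then w ++ [[i + j, i, j]] else w) w) []
  (vertices, weights)

-- ===== PORT B =====
def graph_generator_kruskal_alt (number_of_cities : Int) : List Int × List (List Int) :=
  let n := number_of_cities
  let vertices := PySem.List.pyRange 1 (n + 1) 1
  let weights :=
    vertices.flatMap (fun i =>
      ([-3, -2, -1, 1, 2, 3] : List Int).filterMap (fun d =>
        if 1 ≤ i + d ∧ i + d ≤ n then some [2 * i + d, i, i + d] else none))
  (vertices, weights)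

-- ===== PRECONDITION & SPEC =====
def Spec_graph_generator_kruskal (number_of_cities : Int) (out : List Int × List (List Int)) : Prop := out = graph_generator_kruskal_alt number_of_cities
instance (number_of_cities : Int) (out : List Int × List (List Int)) : Decidable (Spec_graph_generator_kruskal number_of_cities out) := by unfold Spec_graph_generator_kruskal; infer_instance

-- ===== CLAIM =====
def Claim_equal_graph_generator_kruskal : Prop := ∀ (number_of_cities : Int), Dom_graph_generator_kruskal number_of_cities → Spec_graph_generator_kruskal number_of_cities (graph_generator_kruskal number_of_cities)

-- ===== LEMMAS AND PROOFS =====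

-- filterMap with an 'if p then some (g d) else none' body is filter-then-map.
lemma filterMap_if_eq_map_filter {α β : Type} (l : List α) (p : α → Prop) [DecidablePred p]
    (g : α → β) :
    l.filterMap (fun a => if p a then some (g a) else none)
      = (l.filter (fun a => decide (p a))).map g := by
  induction l with
  | nil => rfl
  | cons a t ih =>
    by_cases h : p a <;> simp [h, ih]

-- The j's A keeps for a given i are exactly i + d for the kept offsets d.
lemma kept_js (n i : Int) (h1 : 1 ≤ i) (h2 : i ≤ n) :
    (PySem.List.pyRange 1 (n + 1) 1).filter (fun j => decide ((i - j).natAbs ≤ 3 ∧ i ≠ j))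
      = (([-3, -2, -1, 1, 2, 3] : List Int).filter
          (fun d => decide (1 ≤ i + d ∧ i + d ≤ n))).map (fun d => i + d) := by
  have pw1 : ((PySem.List.pyRange 1 (n + 1) 1).filter
      (fun j => decide ((i - j).natAbs ≤ 3 ∧ i ≠ j))).Pairwise (· < ·) :=
    (PySem.List.pairwise_lt_pyRange_one 1 (n + 1)).filter _
  have pw2 : ((([-3, -2, -1, 1, 2, 3] : List Int).filter
      (fun d => decide (1 ≤ i + d ∧ i + d ≤ n))).map (fun d => i + d)).Pairwise (· < ·) :=
    List.Pairwise.map _ (fun a b h => by omega)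
      (List.Pairwise.filter _ ((by decide : (([-3, -2, -1, 1, 2, 3] : List Int)).Pairwise (· < ·))))
  have nd1 := pw1.imp (fun {a b} h => ne_of_lt h)
  have nd2 := pw2.imp (fun {a b} h => ne_of_lt h)
  have hmem : ∀ x, (x ∈ (PySem.List.pyRange 1 (n + 1) 1).filter
        (fun j => decide ((i - j).natAbs ≤ 3 ∧ i ≠ j)))
      ↔ x ∈ (([-3, -2, -1, 1, 2, 3] : List Int).filter
          (fun d => decide (1 ≤ i + d ∧ i + d ≤ n))).map (fun d => i + d) := by
    intro x
    simp only [List.mem_filter, List.mem_map, PySem.List.mem_pyRange_one,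
      decide_eq_true_eq, List.mem_cons, List.not_mem_nil]
    constructor
    · rintro ⟨⟨hx1, hx2⟩, hab, hne⟩
      exact ⟨x - i, ⟨by omega, by omega⟩, by omega⟩
    · rintro ⟨d, ⟨hd, hrng⟩, rfl⟩
      rcases hd with rfl | rfl | rfl | rfl | rfl | rfl | h
      · omega
      · omega
      · omega
      · omega
      · omega
      · omega
      · exact h.elim
  exact List.Perm.eq_of_pairwise (fun a b _ _ hab hba => by omega) pw1 pw2
    ((List.perm_ext_iff_of_nodup nd1 nd2).mpr hmem)

-- ===== VERDICT =====
theorem graph_generator_kruskal_spec : Claim_equal_graph_generator_kruskal := by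
  intro n _
  show graph_generator_kruskal n = graph_generator_kruskal_alt n
  unfold graph_generator_kruskal graph_generator_kruskal_alt
  refine Prod.ext rfl ?_
  simp only
  have step : ∀ (w : List (List Int)) (i : Int), i ∈ PySem.List.pyRange 1 (n + 1) 1 →
      (PySem.List.pyRange 1 (n + 1) 1).foldl (fun w j =>
          if (i - j).natAbs ≤ 3 ∧ i ≠ j then w ++ [[i + j, i, j]] else w) w
        = w ++ ([-3, -2, -1, 1, 2, 3] : List Int).filterMap (fun d =>
            if 1 ≤ i + d ∧ i + d ≤ n then some [2 * i + d, i, i + d] else none) := by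
    intro w i hi
    have hib := PySem.List.mem_pyRange_one.mp hi
    rw [PySem.List.foldl_append_ite (p := fun j => (i - j).natAbs ≤ 3 ∧ i ≠ j)
          (f := fun j => [i + j, i, j]),
        kept_js n i (by omega) (by omega),
        filterMap_if_eq_map_filter, List.map_map]
    congr 1
    apply List.map_congr_left
    intro d _
    simp only [Function.comp_apply]
    congr 1
    omega
  rw [PySem.List.foldl_congr_mem (PySem.List.pyRange 1 (n + 1) 1) _
        (fun w i => w ++ ([-3, -2, -1, 1, 2, 3] : List Int).filterMap (fun d =>
          if 1 ≤ i + d ∧ i + d ≤ n then some [2 * i + d, i, i + d] else none)) [] step,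
      PySem.List.foldl_append_eq_flatMap, List.nil_append]
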